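-- pv_equiv track=rewrite | github.com/jsuci/gidapp | swertres/script_common_pairs_v1.1.py | compare_digits
-- ===== SOURCE A (Python) =====
-- def compare_digits(digit_1, digit_2):
--
--     for num_1 in digit_1:
--         if num_1 in digit_2:
--             digit_2 = digit_2.replace(num_1, "", 1)
--
--     # Check if digits has two common digits
--     if len(digit_2) <= 1:
--         return True
--     else:
--         return False
-- ===== SOURCE B (Python) =====
-- def compare_digits(digit_1, digit_2):
--     overlap = 0
--     for ch in set(digit_2):
--         c1 = digit_1.count(ch)
--         c2 = digit_2.count(ch)
--         overlap += c1 if c1 < c2 else c2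
--     return len(digit_2) - overlap <= 1
-- ===== Notes on version B (the rewrite author's own statement) =====
-- stated objective: faster
-- what changed: Replaces A's scan-and-remove loop (repeatedly rebuilding digit_2 via replace) with a single frequency-count pass: overlap = sum of min(count in digit_1, count in digit_2) over the distinct chars of digit_2, returning len(digit_2) - overlap <= 1.
import Mathlib
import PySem

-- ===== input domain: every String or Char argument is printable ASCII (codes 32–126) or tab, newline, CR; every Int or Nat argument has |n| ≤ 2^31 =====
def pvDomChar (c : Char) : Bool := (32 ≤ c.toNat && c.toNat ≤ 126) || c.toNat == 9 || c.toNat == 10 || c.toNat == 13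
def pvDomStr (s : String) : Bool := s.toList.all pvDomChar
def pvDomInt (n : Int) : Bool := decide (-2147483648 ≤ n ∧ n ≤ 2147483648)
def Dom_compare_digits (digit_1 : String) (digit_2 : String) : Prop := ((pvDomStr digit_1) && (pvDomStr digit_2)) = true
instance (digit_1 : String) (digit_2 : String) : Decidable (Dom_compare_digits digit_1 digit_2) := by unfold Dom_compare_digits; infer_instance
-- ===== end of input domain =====

-- B replaces A's destructive scan-and-remove loop with a min-of-counts overlap sum over the distinct chars of digit_2 (simpler, no mutation).


-- ===== PORT A =====
-- for num_1 in digit_1: if num_1 in digit_2: digit_2 = digit_2.replace(num_1, "", 1)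
-- (single-char membership / replace-count-1 is exactly first-occurrence erase on the char list)
def compare_digits (digit_1 : String) (digit_2 : String) : Bool :=
  let d2 := digit_1.toList.foldl
    (fun (s : List Char) (c : Char) => if c ∈ s then s.erase c else s) digit_2.toList
  if d2.length ≤ 1 then true else false

-- ===== PORT B =====
-- overlap = sum over set(digit_2) of min(digit_1.count ch, digit_2.count ch); len(digit_2) - overlap <= 1
def compare_digits_alt (digit_1 : String) (digit_2 : String) : Bool :=
  let overlap : Int := (PySem.Set.ofList digit_2.toList).foldl
    (fun (a : Int) (c : Char) =>
      let c1 : Int := digit_1.toList.count c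
      let c2 : Int := digit_2.toList.count c
      a + (if c1 < c2 then c1 else c2)) 0
  decide ((digit_2.toList.length : Int) - overlap ≤ 1)

-- ===== PRECONDITION & SPEC =====
def Spec_compare_digits (digit_1 : String) (digit_2 : String) (out : Bool) : Prop := out = compare_digits_alt digit_1 digit_2
instance (digit_1 : String) (digit_2 : String) (out : Bool) : Decidable (Spec_compare_digits digit_1 digit_2 out) := by unfold Spec_compare_digits; infer_instance

-- ===== CLAIM (what is proved, stated in full; the proofs are below) =====
def Claim_equal_compare_digits : Prop := ∀ (digit_1 : String) (digit_2 : String), Dom_compare_digits digit_1 digit_2 → Spec_compare_digits digit_1 digit_2 (compare_digits digit_1 digit_2)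

-- ===== LEMMAS AND PROOFS =====

-- the overlap as a Finset sum of min-counts
def pvOverlap (l s : List Char) : ℕ := ∑ c ∈ s.toFinset, min (l.count c) (s.count c)

lemma pvOverlap_cons_mem (c : Char) (l s : List Char) (hc : c ∈ s) :
    pvOverlap (c :: l) s = 1 + pvOverlap l (s.erase c) := by
  have hc' : c ∈ s.toFinset := List.mem_toFinset.mpr hc
  have hpos : 0 < s.count c := List.count_pos_iff.mpr hc
  have hsub : (s.erase c).toFinset ⊆ s.toFinset := by
    intro x hx
    exact List.mem_toFinset.mpr (List.mem_of_mem_erase (List.mem_toFinset.mp hx))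
  have hext : pvOverlap l (s.erase c)
      = ∑ x ∈ s.toFinset, min (l.count x) ((s.erase c).count x) := by
    unfold pvOverlap
    apply Finset.sum_subset hsub
    intro x _ hnx
    have h0 : (s.erase c).count x = 0 :=
      List.count_eq_zero.mpr (fun h => hnx (List.mem_toFinset.mpr h))
    simp [h0]
  rw [pvOverlap, hext, ← Finset.add_sum_erase _ _ hc', ← Finset.add_sum_erase _ _ hc']
  have hterm : min ((c :: l).count c) (s.count c)
      = 1 + min (l.count c) ((s.erase c).count c) := by
    simp only [List.count_cons_self, List.count_erase_self]
    omega
  have hrest : ∑ x ∈ s.toFinset.erase c, min ((c :: l).count x) (s.count x)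
      = ∑ x ∈ s.toFinset.erase c, min (l.count x) ((s.erase c).count x) := by
    refine Finset.sum_congr rfl (fun x hx => ?_)
    have hne : x ≠ c := (Finset.mem_erase.mp hx).1
    rw [List.count_erase_of_ne hne]
    simp [Ne.symm hne]
  rw [hterm, hrest]
  omega

lemma pvOverlap_cons_not_mem (c : Char) (l s : List Char) (hc : c ∉ s) :
    pvOverlap (c :: l) s = pvOverlap l s := by
  refine Finset.sum_congr rfl (fun x hx => ?_)
  have hne : x ≠ c := fun h => hc (h ▸ List.mem_toFinset.mp hx)
  simp [Ne.symm hne]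

lemma pv_main (l s : List Char) :
    (l.foldl (fun (t : List Char) (c : Char) => if c ∈ t then t.erase c else t) s).length
      + pvOverlap l s = s.length := by
  induction l generalizing s with
  | nil => simp [pvOverlap]
  | cons c l ih =>
    by_cases hc : c ∈ s
    · have h1 := ih (s.erase c)
      have hpos : 0 < s.length := List.length_pos_iff.mpr (List.ne_nil_of_mem hc)
      have hlen : (s.erase c).length = s.length - 1 := List.length_erase_of_mem hc
      rw [List.foldl_cons, if_pos hc, pvOverlap_cons_mem c l s hc]
      omega
    · simp only [List.foldl_cons, if_neg hc, pvOverlap_cons_not_mem c l s hc]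
      exact ih s

-- B's fold equals the Finset sum
lemma pv_fold_eq_overlap (l s : List Char) :
    (PySem.Set.ofList s).foldl
      (fun (a : Int) (c : Char) =>
        a + (if (l.count c : Int) < (s.count c : Int) then (l.count c : Int) else (s.count c : Int))) 0
      = (pvOverlap l s : Int) := by
  have hfold : ∀ (t : List Char) (i : Int),
      t.foldl (fun (a : Int) (c : Char) =>
        a + (if (l.count c : Int) < (s.count c : Int) then (l.count c : Int) else (s.count c : Int))) i
      = i + (t.map (fun c => ((min (l.count c) (s.count c) : ℕ) : Int))).sum := by
    intro t
    induction t with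
    | nil => intro i; simp
    | cons c t ih =>
      intro i
      have hmin : (if (l.count c : Int) < (s.count c : Int) then (l.count c : Int) else (s.count c : Int))
          = ((min (l.count c) (s.count c) : ℕ) : Int) := by
        push_cast
        omega
      simp only [List.foldl_cons, List.map_cons, List.sum_cons, ih, hmin]
      ring
  rw [hfold]
  have hfs : (PySem.Set.ofList s).toFinset = s.toFinset := by
    ext x
    simp [List.mem_toFinset, PySem.Set.mem_ofList]
  have hsum := List.sum_toFinset (fun c => ((min (l.count c) (s.count c) : ℕ) : Int))
    (PySem.Set.nodup_ofList s)
  rw [← hsum, hfs, pvOverlap]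
  push_cast
  simp

-- ===== VERDICT (by name: the statement is the Claim_ definition above) =====
theorem compare_digits_spec : Claim_equal_compare_digits := by
  intro d1 d2 _
  unfold Spec_compare_digits compare_digits compare_digits_alt
  have hmain := pv_main d1.toList d2.toList
  have hfold := pv_fold_eq_overlap d1.toList d2.toList
  simp only [hfold]
  have hlen2 : d2.toList.length = d2.length := by simp
  split
  · rename_i h
    symm
    rw [decide_eq_true_eq]
    omega
  · rename_i h
    symm
    rw [decide_eq_false_iff_not]
    omega
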